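-- pv_equiv track=rewrite | github.com/tresoldi/kemet-data | scripts/ingest/ramses.py | _parse_transliteration
-- ===== SOURCE A (Python) =====
-- def _parse_transliteration(tgt_line: str) -> list[str]:
--     """
--     Parse transliteration line into words.
--
--     Underscores (_) mark word boundaries. Remove them and return words.
--     """
--     # Split by whitespace and remove underscores
--     parts = tgt_line.split()
--     words: list[str] = []
--     current_word: list[str] = []
--
--     for part in parts:
--         if part == "_":
--             # Word boundary - save current word if any
--             if current_word:
--                 words.append("".join(current_word))
--                 current_word = []
--         else:
--             current_word.append(part)
--
--     # Add final word if any
--     if current_word: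
--         words.append("".join(current_word))
--
--     return words
-- ===== SOURCE B (Python) =====
-- def _parse_transliteration(tgt_line: str) -> list[str]:
--     """
--     Parse transliteration line into words.
--
--     Underscores (_) mark word boundaries. Remove them and return words.
--     """
--     parts = tgt_line.split()
--     words: list[str] = []
--     n = len(parts)
--     i = 0
--     while i < n:
--         if parts[i] == "_":
--             i += 1
--             continue
--         j = i
--         while j < n and parts[j] != "_":
--             j += 1
--         words.append("".join(parts[i:j]))
--         i = j
--     return words
-- ===== Notes on version B (the rewrite author's own statement) =====
-- stated objective: alternative
-- what changed: Replaces A's accumulator-and-flush loop (collecting tokens and flushing at each underscore and at the end) with a run-based scan: skip underscore tokens, and for each maximal run of non-underscore tokens emit its join in one step.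
import Mathlib
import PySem

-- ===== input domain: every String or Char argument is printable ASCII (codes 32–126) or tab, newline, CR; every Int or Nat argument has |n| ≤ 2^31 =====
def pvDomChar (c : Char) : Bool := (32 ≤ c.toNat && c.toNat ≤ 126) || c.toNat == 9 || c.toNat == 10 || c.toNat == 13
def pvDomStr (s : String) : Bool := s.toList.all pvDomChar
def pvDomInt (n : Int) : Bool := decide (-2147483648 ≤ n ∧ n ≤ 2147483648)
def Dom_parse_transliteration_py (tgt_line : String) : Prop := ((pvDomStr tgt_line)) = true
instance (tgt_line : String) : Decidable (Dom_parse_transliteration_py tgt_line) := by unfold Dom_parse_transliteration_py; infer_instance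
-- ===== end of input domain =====

-- B replaces A's accumulator-and-flush loop with a run-based scan (skip underscores, emit each maximal non-underscore run joined); alternative decomposition, same cost.

-- ===== PORT A =====
-- loop body: state = (words, current_word)
def pvStepA (st : List String × List String) (part : String) : List String × List String :=
  if part == "_" then
    if st.2.isEmpty then st else (st.1 ++ [PySem.Str.join "" st.2], [])
  else (st.1, st.2 ++ [part])

-- trailing 'if current_word: words.append("".join(current_word))'
def pvFinishA (st : List String × List String) : List String :=
  if st.2.isEmpty then st.1 else st.1 ++ [PySem.Str.join "" st.2]

def parse_transliteration_py (tgt_line : String) : List String :=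
  let parts := PySem.Str.split₀ tgt_line
  pvFinishA (parts.foldl pvStepA ([], []))

-- ===== PORT B =====
-- run-based scan: skip an underscore token, else emit the join of the maximal
-- non-underscore run (Source B's inner while-scan i..j) and continue after it
def pvRuns : List String → List String
  | [] => []
  | p :: rest =>
    if p == "_" then pvRuns rest
    else
      PySem.Str.join "" (List.takeWhile (fun q => !(q == "_")) (p :: rest)) ::
        pvRuns (List.dropWhile (fun q => !(q == "_")) (p :: rest))
termination_by l => l.length
decreasing_by
  · simp
  · have h : (fun q => !(q == "_")) p = true := by simp_all
    rw [List.dropWhile_cons_of_pos (p := fun q => !(q == "_")) h]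
    have := List.length_dropWhile_le (fun q => !(q == "_")) rest
    simp only [List.length_cons]
    omega

def parse_transliteration_py_alt (tgt_line : String) : List String :=
  pvRuns (PySem.Str.split₀ tgt_line)

-- ===== PRECONDITION & SPEC =====
def Spec_parse_transliteration_py (tgt_line : String) (out : List String) : Prop := out = parse_transliteration_py_alt tgt_line
instance (tgt_line : String) (out : List String) : Decidable (Spec_parse_transliteration_py tgt_line out) := by unfold Spec_parse_transliteration_py; infer_instance

-- ===== CLAIM (what is proved, stated in full; the proofs are below) =====
def Claim_equal_parse_transliteration_py : Prop := ∀ (tgt_line : String), Dom_parse_transliteration_py tgt_line → Spec_parse_transliteration_py tgt_line (parse_transliteration_py tgt_line)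

-- ===== LEMMAS AND PROOFS =====

-- proof-only common reference recursion (A's flush behaviour stated structurally)
def pvSpecRun : List String → List String → List String
  | cur, [] => if cur.isEmpty then [] else [PySem.Str.join "" cur]
  | cur, p :: rest =>
    if p == "_" then
      if cur.isEmpty then pvSpecRun [] rest
      else PySem.Str.join "" cur :: pvSpecRun [] rest
    else pvSpecRun (cur ++ [p]) rest

theorem pvA_loop_eq (parts : List String) : ∀ (words cur : List String),
    pvFinishA (parts.foldl pvStepA (words, cur)) = words ++ pvSpecRun cur parts := by
  induction parts with
  | nil =>
    intro words cur
    simp only [List.foldl_nil, pvSpecRun, pvFinishA]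
    by_cases h : cur.isEmpty <;> simp [h]
  | cons p rest ih =>
    intro words cur
    rw [List.foldl_cons]
    by_cases hp : (p == "_") = true
    · by_cases hc : cur.isEmpty = true
      · have hstep : pvStepA (words, cur) p = (words, cur) := by
          simp [pvStepA, hp, hc]
        rw [List.isEmpty_iff] at hc
        rw [hstep, ih, hc]
        simp [pvSpecRun, hp]
      · have hstep : pvStepA (words, cur) p = (words ++ [PySem.Str.join "" cur], []) := by
          simp [pvStepA, hp, hc]
        rw [hstep, ih]
        simp [pvSpecRun, hp, hc]
    · have hstep : pvStepA (words, cur) p = (words, cur ++ [p]) := by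
        simp [pvStepA, hp]
      rw [hstep, ih]
      simp [pvSpecRun, hp]

theorem pvSpecRun_run (l : List String) : ∀ (cur : List String), ¬ cur.isEmpty →
    pvSpecRun cur l
      = PySem.Str.join "" (cur ++ List.takeWhile (fun q => !(q == "_")) l)
          :: pvSpecRun [] (List.dropWhile (fun q => !(q == "_")) l) := by
  induction l with
  | nil => intro cur hc; simp [pvSpecRun, hc]
  | cons p rest ih =>
    intro cur hc
    by_cases hp : (p == "_") = true
    · have h1 : (fun q => !(q == "_")) p = false := by simp_all
      rw [List.takeWhile_cons_of_neg (by simp [h1]), List.dropWhile_cons_of_neg (by simp [h1])]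
      simp [pvSpecRun, hp, hc]
    · have h1 : (fun q => !(q == "_")) p = true := by simp_all
      rw [List.takeWhile_cons_of_pos (p := fun q => !(q == "_")) h1, List.dropWhile_cons_of_pos (p := fun q => !(q == "_")) h1]
      have hne : ¬ (cur ++ [p]).isEmpty = true := by simp
      have hred : pvSpecRun cur (p :: rest) = pvSpecRun (cur ++ [p]) rest := by
        simp [pvSpecRun, hp]
      rw [hred, ih _ hne]
      simp

theorem pvRuns_eq_specRun : ∀ (l : List String), pvRuns l = pvSpecRun [] l := by
  intro l
  induction l using pvRuns.induct with
  | case1 => simp [pvRuns, pvSpecRun]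
  | case2 p rest hp ih =>
    simp [pvRuns, pvSpecRun, hp, ih]
  | case3 p rest hp ih =>
    have h1 : (fun q => !(q == "_")) p = true := by simp_all
    rw [pvRuns, if_neg hp]
    rw [List.takeWhile_cons_of_pos (p := fun q => !(q == "_")) h1, List.dropWhile_cons_of_pos (p := fun q => !(q == "_")) h1]
    rw [List.dropWhile_cons_of_pos (p := fun q => !(q == "_")) h1] at ih
    have hred : pvSpecRun ([] : List String) (p :: rest) = pvSpecRun [p] rest := by
      simp [pvSpecRun, hp]
    rw [hred, pvSpecRun_run rest [p] (by simp), ih]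
    simp

-- ===== VERDICT (by name: the statement is the Claim_ definition above) =====
theorem parse_transliteration_py_spec : Claim_equal_parse_transliteration_py := by
  intro tgt_line _
  unfold Spec_parse_transliteration_py parse_transliteration_py parse_transliteration_py_alt
  rw [pvRuns_eq_specRun]
  exact pvA_loop_eq (PySem.Str.split₀ tgt_line) [] []
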